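-- pv_equiv track=rewrite | github.com/APrioriInvestments/typed_python | typed_python/compiler/type_wrappers/min_max_wrapper.py | i_min_default
-- ===== SOURCE A (Python) =====
-- def i_min_default(v, default):
--     first = 1
--     for e in v:
--         if first or e < ret:  # noqa: F821
--             first = 0
--             ret = e
--     if first:
--         return default
--     return ret
-- ===== SOURCE B (Python) =====
-- def i_min_default(v, default):
--     s = sorted(v)
--     return s[0] if s else default
-- ===== Notes on version B (the rewrite author's own statement) =====
-- stated objective: alternative
-- what changed: B sorts the list and returns the head of the sorted list (default if empty), replacing A's flag-carrying single-pass running-minimum loop with a sort-then-pick algorithm.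
import Mathlib
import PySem

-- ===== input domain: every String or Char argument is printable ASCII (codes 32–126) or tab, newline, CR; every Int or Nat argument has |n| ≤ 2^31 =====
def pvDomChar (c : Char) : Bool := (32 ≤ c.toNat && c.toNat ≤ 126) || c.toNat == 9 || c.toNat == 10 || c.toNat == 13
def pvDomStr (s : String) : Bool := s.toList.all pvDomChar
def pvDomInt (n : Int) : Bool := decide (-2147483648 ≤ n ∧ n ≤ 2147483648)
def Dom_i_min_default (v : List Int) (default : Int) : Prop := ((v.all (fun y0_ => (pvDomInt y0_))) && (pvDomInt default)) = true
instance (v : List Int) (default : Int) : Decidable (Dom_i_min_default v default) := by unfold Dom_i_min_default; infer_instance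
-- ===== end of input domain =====

-- B sorts and picks the head (default if empty) instead of A's flag-carrying running-minimum loop; alternative algorithm, not claimed faster.

-- ===== PORT A =====
-- Python's 'ret' is unassigned until the first iteration; the state carries a dummy 0
-- that is never read while 'first' is true (the 'first ||' branch always overwrites it).
def i_min_default (v : List Int) (default : Int) : Int :=
  let st := v.foldl
    (fun (st : Bool × Int) e => if st.1 || e < st.2 then (false, e) else st)
    (true, 0)
  if st.1 then default else st.2

-- ===== PORT B =====
def i_min_default_alt (v : List Int) (default : Int) : Int :=
  let s := PySem.List.sorted v (fun x => x) false
  match s with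
  | [] => default
  | x :: _ => x

-- ===== PRECONDITION & SPEC =====
def Spec_i_min_default (v : List Int) (default : Int) (out : Int) : Prop := out = i_min_default_alt v default
instance (v : List Int) (default : Int) (out : Int) : Decidable (Spec_i_min_default v default out) := by unfold Spec_i_min_default; infer_instance

-- ===== CLAIM (what is proved, stated in full; the proofs are below) =====
def Claim_equal_i_min_default : Prop := ∀ (v : List Int) (default : Int), Dom_i_min_default v default → Spec_i_min_default v default (i_min_default v default)

-- ===== LEMMAS AND PROOFS =====
-- Once 'first' is false, A's fold keeps it false, its 'ret' stays a member of r :: t,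
-- and is a lower bound of r :: t.
theorem i_min_default_fold_min (t : List Int) (r : Int) :
    (t.foldl (fun (st : Bool × Int) e => if st.1 || e < st.2 then (false, e) else st) (false, r)).1 = false ∧
    (t.foldl (fun (st : Bool × Int) e => if st.1 || e < st.2 then (false, e) else st) (false, r)).2 ∈ r :: t ∧
    ∀ y ∈ r :: t, (t.foldl (fun (st : Bool × Int) e => if st.1 || e < st.2 then (false, e) else st) (false, r)).2 ≤ y := by
  induction t generalizing r with
  | nil => simp
  | cons e t ih =>
    rw [List.foldl_cons]
    by_cases h : e < r
    · rw [if_pos (by simp [h])]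
      obtain ⟨h1, h2, h3⟩ := ih e
      refine ⟨h1, List.mem_cons_of_mem _ h2, ?_⟩
      · intro y hy
        rcases List.mem_cons.mp hy with hy | hy
        · subst hy; exact (h3 e (List.mem_cons_self)).trans (le_of_lt h)
        · rcases List.mem_cons.mp hy with hy | hy
          · subst hy; exact h3 y List.mem_cons_self
          · exact h3 y (List.mem_cons_of_mem _ hy)
    · rw [if_neg (by simp [h])]
      obtain ⟨h1, h2, h3⟩ := ih r
      refine ⟨h1, ?_, ?_⟩
      · rcases List.mem_cons.mp h2 with h2 | h2
        · exact List.mem_cons.mpr (Or.inl h2)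
        · exact List.mem_cons_of_mem _ (List.mem_cons_of_mem _ h2)
      · intro y hy
        rcases List.mem_cons.mp hy with hy | hy
        · subst hy; exact h3 y List.mem_cons_self
        · rcases List.mem_cons.mp hy with hy | hy
          · subst hy; exact (h3 r List.mem_cons_self).trans (le_of_not_gt h)
          · exact h3 y (List.mem_cons_of_mem _ hy)

-- ===== VERDICT (by name: the statement is the Claim_ definition above) =====
theorem i_min_default_spec : Claim_equal_i_min_default := by
  intro v default _
  unfold Spec_i_min_default i_min_default i_min_default_alt
  cases v with
  | nil => rfl
  | cons h t =>
    simp only [List.foldl_cons]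
    rw [if_pos (by simp : (((true : Bool) || decide (h < (0:Int))) = true))]
    obtain ⟨h1, h2, h3⟩ := i_min_default_fold_min t h
    rcases hs : PySem.List.sorted (h :: t) (fun x => x) false with _ | ⟨m, s⟩
    · exact absurd ((PySem.List.sorted_eq_nil_iff _ _ _).mp hs) (by simp)
    · simp only [h1, if_neg (Bool.false_ne_true)]
      have hm : m ∈ h :: t := by
        have := PySem.List.mem_sorted (xs := h :: t) (key := fun x => x) (rev := false) (x := m)
        rw [hs] at this; exact this.mp List.mem_cons_self
      exact le_antisymm (h3 m hm)
        (PySem.List.key_head_sorted_le _ _ hs _ h2)
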